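-- pv_equiv track=rewrite | github.com/austinProGit/scheduler | src/schedule_inspector.py | freshman_with_4000_level_courses
-- ===== SOURCE A (Python) =====
-- def schedule_length(schedule):
--     return len(schedule)
--
-- def semester_type_sequence(schedule):
--     SEMESTER_TYPE_SUCCESSOR = {'Fa': 'Sp', 'Sp': 'Su', 'Su': 'Fa'}
--     sequence = None
--     previous_season = 'Su'
--     if schedule_length(schedule) > 0:
--         sequence = []
--         for semester in schedule:
--             sequence.append(SEMESTER_TYPE_SUCCESSOR[previous_season])
--             previous_season = SEMESTER_TYPE_SUCCESSOR[previous_season]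
--     return sequence
--
-- def last_semester_type(schedule):
--     semester_types = semester_type_sequence(schedule)
--     if semester_types != None:
--         return semester_types[-1]
--     else: return None
--
-- def senior_interval(schedule):
--     last_type = last_semester_type(schedule)
--     if last_type == 'Su':
--         return -3
--     if last_type == 'Sp':
--         return -2
--     if last_type == 'Fa':
--         return -1
--
-- def senior_year_semesters_list(schedule):
--     if schedule == None or schedule == [] or schedule == [[]]:
--         return None
--     senior_semesters = []
--     index = senior_interval(schedule)
--     for i in range(index, 0):
--         for semester in schedule[i]:
--             senior_semesters.append(semester)
--     return senior_semesters
--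
-- def freshman_interval(schedule):
--     last_type = last_semester_type(schedule)
--     freshman_schedule = schedule
--     length = schedule_length(schedule)
--     if last_type == 'Su' and length > 9:
--         return freshman_schedule[:length-9]
--     if last_type == 'Sp' and length > 8:
--         return freshman_schedule[:length-8]
--     if last_type == 'Fa' and length > 7:
--         return freshman_schedule[:length-7]
--
-- def freshman_year_semesters_list(schedule):
--     freshman_semesters = schedule
--     if freshman_semesters != None and schedule_length(schedule) > 0:
--         freshman_semesters = freshman_interval(schedule)
--         freshman_semesters = senior_year_semesters_list(freshman_semesters)
--     return freshman_semesters
--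
-- def freshman_with_4000_level_courses(schedule):
--     found = False
--     freshman_year = freshman_year_semesters_list(schedule)
--     if freshman_year != None:
--         for course in freshman_year:
--             if ' 4' in course:
--                 found = True
--                 break
--     return found
-- ===== SOURCE B (Python) =====
-- def freshman_with_4000_level_courses(schedule):
--     # Closed form: the last semester type is determined by len(schedule) % 3,
--     # and the freshman "senior slice" is always the last 3 semesters of the prefix.
--     if schedule is None:
--         return False
--     n = len(schedule)
--     k = n - (9, 7, 8)[n % 3]
--     if k <= 0:
--         return False
--     return any(' 4' in course for sem in schedule[k-3:k] for course in sem)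
-- ===== Notes on version B (the rewrite author's own statement) =====
-- stated objective: simpler
-- what changed: B replaces A's helper chain (building the whole semester-type list, taking its last element, then re-running the senior-slice machinery on a prefix) by the closed form n % 3 -> offset and a single slice of the three freshman semesters, flattened into one any().
import Mathlib
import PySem

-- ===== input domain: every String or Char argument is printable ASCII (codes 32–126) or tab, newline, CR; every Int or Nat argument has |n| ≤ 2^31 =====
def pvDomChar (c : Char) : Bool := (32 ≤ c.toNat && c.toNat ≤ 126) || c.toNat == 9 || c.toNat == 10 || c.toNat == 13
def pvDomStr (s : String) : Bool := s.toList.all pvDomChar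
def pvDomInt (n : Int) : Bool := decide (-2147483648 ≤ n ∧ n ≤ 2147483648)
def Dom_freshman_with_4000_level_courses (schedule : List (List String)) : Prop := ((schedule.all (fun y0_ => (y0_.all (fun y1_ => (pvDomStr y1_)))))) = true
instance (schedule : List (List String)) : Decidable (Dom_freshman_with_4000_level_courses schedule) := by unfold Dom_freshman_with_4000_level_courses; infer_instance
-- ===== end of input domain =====

-- B replaces A's helper chain (build the whole semester-type list, pick its last element,
-- re-run the senior-slice machinery on a prefix) by the closed form n % 3 → offset and one
-- slice; objective: simpler.

-- ===== PORT A =====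
-- SEMESTER_TYPE_SUCCESSOR dict
def pvSuccDict : PySem.Dict String String :=
  PySem.Dict.ofList [("Fa", "Sp"), ("Sp", "Su"), ("Su", "Fa")]

-- SEMESTER_TYPE_SUCCESSOR[prev]; the key is always one of 'Fa'/'Sp'/'Su' here, so the
-- KeyError case (.getD "") is unreachable and the port is exact
def pvSucc (prev : String) : String := (PySem.Dict.get? pvSuccDict prev).getD ""

def schedule_length (schedule : List (List String)) : Int := schedule.length

-- the for-loop of semester_type_sequence: state = (previous_season, sequence)
def pvStsLoop : List (List String) → String → List String → List String
  | [], _, seq => seq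
  | _ :: rest, prev, seq => pvStsLoop rest (pvSucc prev) (seq ++ [pvSucc prev])

def semester_type_sequence (schedule : List (List String)) : Option (List String) :=
  if schedule_length schedule > 0 then some (pvStsLoop schedule "Su" []) else none

-- semester_types[-1]; the list is nonempty whenever it exists, so IndexError (none) is unreachable
def last_semester_type (schedule : List (List String)) : Option String :=
  match semester_type_sequence schedule with
  | some tys => PySem.List.pyGet? tys (-1)
  | none => none

-- falls off the end (returns Python None) when last_type matches no branch
def senior_interval (schedule : List (List String)) : Option Int :=
  let last_type := last_semester_type schedule
  if last_type = some "Su" then some (-3)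
  else if last_type = some "Sp" then some (-2)
  else if last_type = some "Fa" then some (-1)
  else none

-- argument may be Python None (the result of freshman_interval)
def senior_year_semesters_list (schedule? : Option (List (List String))) : Option (List String) :=
  match schedule? with
  | none => none
  | some s =>
    if s = [] ∨ s = [[]] then none
    else
      match senior_interval s with
      | some index =>
          some ((PySem.List.pyRange index 0 1).foldl
            (fun acc i => acc ++ ((PySem.List.pyGet? s i).getD [])) [])
      | none => none  -- Python would raise TypeError in range(None, 0); unreachable (s is nonempty)

def freshman_interval (schedule : List (List String)) : Option (List (List String)) :=
  let last_type := last_semester_type schedule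
  let length := schedule_length schedule
  if last_type = some "Su" ∧ length > 9 then some (PySem.List.slice schedule none (some (length - 9)))
  else if last_type = some "Sp" ∧ length > 8 then some (PySem.List.slice schedule none (some (length - 8)))
  else if last_type = some "Fa" ∧ length > 7 then some (PySem.List.slice schedule none (some (length - 7)))
  else none

def freshman_year_semesters_list (schedule : List (List String)) : Option (List String) :=
  if schedule_length schedule > 0 then
    senior_year_semesters_list (freshman_interval schedule)
  else some []  -- Python returns `schedule` itself here, which is necessarily []

-- the for-loop of freshman_with_4000_level_courses with its break
def pvFoundLoop : List String → Bool
  | [] => false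
  | course :: rest => if PySem.Str.isIn " 4" course then true else pvFoundLoop rest

def freshman_with_4000_level_courses (schedule : List (List String)) : Bool :=
  match freshman_year_semesters_list schedule with
  | none => false
  | some freshman_year => pvFoundLoop freshman_year

-- ===== PORT B =====
def freshman_with_4000_level_courses_alt (schedule : List (List String)) : Bool :=
  -- `if schedule is None: return False` of Source B is not representable (schedule is a list here)
  let n : Int := schedule.length
  let sub : Int := if PySem.Int.mod n 3 = 0 then 9 else if PySem.Int.mod n 3 = 1 then 7 else 8
  let k : Int := n - sub
  if k ≤ 0 then false
  else (PySem.List.slice schedule (some (k - 3)) (some k)).any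
        (fun sem => sem.any (fun course => PySem.Str.isIn " 4" course))

-- ===== PRECONDITION & SPEC =====
def Spec_freshman_with_4000_level_courses (schedule : List (List String)) (out : Bool) : Prop := out = freshman_with_4000_level_courses_alt schedule
instance (schedule : List (List String)) (out : Bool) : Decidable (Spec_freshman_with_4000_level_courses schedule out) := by unfold Spec_freshman_with_4000_level_courses; infer_instance

-- ===== CLAIM (what is proved, stated in full; the proofs are below) =====
def Claim_equal_freshman_with_4000_level_courses : Prop := ∀ (schedule : List (List String)), Dom_freshman_with_4000_level_courses schedule → Spec_freshman_with_4000_level_courses schedule (freshman_with_4000_level_courses schedule)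

-- ===== LEMMAS AND PROOFS =====

-- iterating the successor map (what the loop's previous_season does)
def pvIterN : Nat → String → String
  | 0, p => p
  | n+1, p => pvIterN n (pvSucc p)

lemma pvStsLoop_getLast? :
    ∀ (l : List (List String)) (prev : String) (seq : List String), l ≠ [] →
      (pvStsLoop l prev seq).getLast? = some (pvIterN l.length prev) := by
  intro l
  induction l with
  | nil => intro _ _ h; exact absurd rfl h
  | cons x rest ih =>
    intro prev seq _
    cases rest with
    | nil => simp [pvStsLoop, pvIterN]
    | cons y r =>
      show (pvStsLoop (y :: r) (pvSucc prev) (seq ++ [pvSucc prev])).getLast? = _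
      rw [ih (pvSucc prev) (seq ++ [pvSucc prev]) (by simp)]
      rfl

lemma pvIterN_add3 (m : Nat) : pvIterN (m + 3) "Su" = pvIterN m "Su" := by
  have h1 : pvSucc "Su" = "Fa" := by decide
  have h2 : pvSucc "Fa" = "Sp" := by decide
  have h3 : pvSucc "Sp" = "Su" := by decide
  calc pvIterN (m + 3) "Su" = pvIterN (m + 2) (pvSucc "Su") := rfl
    _ = pvIterN (m + 2) "Fa" := by rw [h1]
    _ = pvIterN (m + 1) (pvSucc "Fa") := rfl
    _ = pvIterN (m + 1) "Sp" := by rw [h2]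
    _ = pvIterN m (pvSucc "Sp") := rfl
    _ = pvIterN m "Su" := by rw [h3]

lemma pvIterN_Su (n : Nat) :
    pvIterN n "Su" = (if n % 3 = 0 then "Su" else if n % 3 = 1 then "Fa" else "Sp") := by
  induction n using Nat.strong_induction_on with
  | _ n ih =>
    by_cases h : n < 3
    · interval_cases n <;> decide
    · obtain ⟨m, rfl⟩ : ∃ m, n = m + 3 := ⟨n - 3, by omega⟩
      rw [pvIterN_add3, ih m (by omega)]
      have : (m + 3) % 3 = m % 3 := by omega
      rw [this]

lemma pvLst_eq (schedule : List (List String)) (h : schedule ≠ []) :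
    last_semester_type schedule = some (pvIterN schedule.length "Su") := by
  unfold last_semester_type semester_type_sequence schedule_length
  have hlen : (schedule.length : Int) > 0 := by
    cases schedule with
    | nil => exact absurd rfl h
    | cons _ _ => simp
  rw [if_pos hlen]
  show PySem.List.pyGet? (pvStsLoop schedule "Su" []) (-1) = some (pvIterN schedule.length "Su")
  rw [PySem.List.pyGet?_neg_one, pvStsLoop_getLast? schedule "Su" [] h]

lemma pvFoundLoop_eq_any (l : List String) :
    pvFoundLoop l = l.any (fun c => PySem.Str.isIn " 4" c) := by
  induction l with
  | nil => rfl
  | cons c r ih =>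
    simp only [pvFoundLoop, List.any_cons, ih]
    cases PySem.Str.isIn " 4" c <;> simp

lemma pvTake3_drop (l : List (List String)) (d : Nat) (h : d + 3 ≤ l.length) :
    (l.drop d).take 3 = [l[d]?.getD [], l[d+1]?.getD [], l[d+2]?.getD []] := by
  have h1 : l.drop d = l[d] :: l.drop (d+1) := List.drop_eq_getElem_cons (by omega)
  have h2 : l.drop (d+1) = l[d+1] :: l.drop (d+2) := List.drop_eq_getElem_cons (by omega)
  have h3 : l.drop (d+2) = l[d+2] :: l.drop (d+3) := List.drop_eq_getElem_cons (by omega)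
  simp only [List.getElem?_eq_getElem (show d < l.length by omega),
    List.getElem?_eq_getElem (show d + 1 < l.length by omega),
    List.getElem?_eq_getElem (show d + 2 < l.length by omega), Option.getD_some]
  rw [h1, h2, h3]
  rfl

-- the senior-year machinery applied to a prefix of length k (a positive multiple of 3)
lemma pvSenior_of_take (schedule : List (List String)) (k : Nat)
    (h3 : 3 ≤ k) (hk : k ≤ schedule.length) (hk3 : k % 3 = 0) :
    senior_year_semesters_list (some (schedule.take k)) =
      some (schedule[k-3]?.getD [] ++ schedule[k-2]?.getD [] ++ schedule[k-1]?.getD []) := by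
  set p := schedule.take k with hp
  have hplen : p.length = k := by
    rw [hp, List.length_take]; omega
  have hpne : p ≠ [] := by
    intro hh; rw [hh] at hplen; simp at hplen; omega
  have hpne1 : p ≠ [[]] := by
    intro hh; rw [hh] at hplen; simp at hplen; omega
  have hlt : last_semester_type p = some "Su" := by
    rw [pvLst_eq p hpne, pvIterN_Su, hplen, if_pos hk3]
  have hsi : senior_interval p = some (-3) := by
    unfold senior_interval; rw [hlt]; simp
  unfold senior_year_semesters_list
  simp only [hsi]
  rw [if_neg (by simp [hpne, hpne1])]
  have hr : PySem.List.pyRange (-3) 0 1 = [-3, -2, -1] := by decide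
  rw [hr]
  simp only [List.foldl_cons, List.foldl_nil, List.nil_append]
  have g3 : PySem.List.pyGet? p (-3) = p[p.length - 3]? :=
    PySem.List.pyGet?_neg_ofNat p 3 (by omega) (by omega)
  have g2 : PySem.List.pyGet? p (-2) = p[p.length - 2]? :=
    PySem.List.pyGet?_neg_ofNat p 2 (by omega) (by omega)
  have g1 : PySem.List.pyGet? p (-1) = p[p.length - 1]? := by
    rw [PySem.List.pyGet?_neg_one, List.getLast?_eq_getElem?]
  rw [g3, g2, g1, hplen]
  have e3 : p[k-3]? = schedule[k-3]? := List.getElem?_take_of_lt (by omega)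
  have e2 : p[k-2]? = schedule[k-2]? := List.getElem?_take_of_lt (by omega)
  have e1 : p[k-1]? = schedule[k-1]? := List.getElem?_take_of_lt (by omega)
  rw [e3, e2, e1]

-- A's freshman_interval, in closed form (for nonempty schedules)
lemma pvFi_char (schedule : List (List String)) (hne : schedule ≠ []) (sub : Nat)
    (hsub : sub = if schedule.length % 3 = 0 then 9
                  else if schedule.length % 3 = 1 then 7 else 8) :
    freshman_interval schedule =
      if sub < schedule.length then some (schedule.take (schedule.length - sub)) else none := by
  set n := schedule.length with hn
  unfold freshman_interval schedule_length
  rw [pvLst_eq schedule hne, pvIterN_Su, ← hn]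
  rcases (by omega : n % 3 = 0 ∨ n % 3 = 1 ∨ n % 3 = 2) with h | h | h
  · -- last type "Su", sub = 9
    have hs : sub = 9 := by rw [hsub]; simp [h]
    rw [h]; subst hs
    by_cases hg : 9 < n
    · rw [if_pos ⟨rfl, by exact_mod_cast hg⟩, if_pos hg,
        PySem.List.slice_to schedule (by omega)]
      have : ((n:Int) - 9).toNat = n - 9 := by omega
      rw [this]
    · rw [if_neg (fun hh => hg (by exact_mod_cast hh.2)),
        if_neg (fun hh => absurd hh.1 (by decide)),
        if_neg (fun hh => absurd hh.1 (by decide)), if_neg hg]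
  · -- last type "Fa", sub = 7
    have hs : sub = 7 := by rw [hsub]; simp [h]
    rw [h]; subst hs
    by_cases hg : 7 < n
    · rw [if_neg (fun hh => absurd hh.1 (by decide)),
        if_neg (fun hh => absurd hh.1 (by decide)),
        if_pos ⟨rfl, by exact_mod_cast hg⟩, if_pos hg,
        PySem.List.slice_to schedule (by omega)]
      have : ((n:Int) - 7).toNat = n - 7 := by omega
      rw [this]
    · rw [if_neg (fun hh => absurd hh.1 (by decide)),
        if_neg (fun hh => absurd hh.1 (by decide)),
        if_neg (fun hh => hg (by exact_mod_cast hh.2)), if_neg hg]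
  · -- last type "Sp", sub = 8
    have hs : sub = 8 := by rw [hsub]; simp [h]
    rw [h]; subst hs
    by_cases hg : 8 < n
    · rw [if_neg (fun hh => absurd hh.1 (by decide)),
        if_pos ⟨rfl, by exact_mod_cast hg⟩, if_pos hg,
        PySem.List.slice_to schedule (by omega)]
      have : ((n:Int) - 8).toNat = n - 8 := by omega
      rw [this]
    · rw [if_neg (fun hh => absurd hh.1 (by decide)),
        if_neg (fun hh => hg (by exact_mod_cast hh.2)),
        if_neg (fun hh => absurd hh.1 (by decide)), if_neg hg]

-- ===== VERDICT (by name: the statement is the Claim_ definition above) =====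
theorem freshman_with_4000_level_courses_spec : Claim_equal_freshman_with_4000_level_courses := by
  intro schedule _
  unfold Spec_freshman_with_4000_level_courses
  cases hsch : schedule with
  | nil => decide
  | cons s0 rest =>
  rw [← hsch]
  have hne : schedule ≠ [] := by rw [hsch]; simp
  set n := schedule.length with hn
  have hnpos : 0 < n := by rw [hsch] at hn; simp [hn]
  set sub : Nat := if n % 3 = 0 then 9 else if n % 3 = 1 then 7 else 8 with hsub
  have hsub3 : sub % 3 = n % 3 := by
    rcases (by omega : n % 3 = 0 ∨ n % 3 = 1 ∨ n % 3 = 2) with h | h | h <;>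
      simp [hsub, h]
  have hsubrange : 7 ≤ sub ∧ sub ≤ 9 := by
    rcases (by omega : n % 3 = 0 ∨ n % 3 = 1 ∨ n % 3 = 2) with h | h | h <;>
      simp [hsub, h]
  -- B side: identify its sub with sub
  have hmod : PySem.Int.mod (n:Int) 3 = ((n % 3 : Nat) : Int) := by
    rw [PySem.Int.mod_eq_emod_of_pos (by norm_num)]; push_cast; rfl
  have hBsub : (if PySem.Int.mod (n:Int) 3 = 0 then (9:Int) else if PySem.Int.mod (n:Int) 3 = 1 then 7 else 8) = (sub : Int) := by
    rw [hmod, hsub]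
    rcases (by omega : n % 3 = 0 ∨ n % 3 = 1 ∨ n % 3 = 2) with h | h | h <;> simp [h]
  unfold freshman_with_4000_level_courses_alt
  simp only [← hn, hBsub]
  unfold freshman_with_4000_level_courses freshman_year_semesters_list schedule_length
  rw [← hn, if_pos (by exact_mod_cast hnpos), pvFi_char schedule hne sub (by rw [hsub, hn])]
  by_cases hg : sub < n
  · -- the freshman slice exists
    set k : Nat := n - sub with hk
    have hk3 : k % 3 = 0 := by omega
    have hk3le : 3 ≤ k := by omega
    have hkn : k ≤ n := by omega
    rw [if_pos hg, pvSenior_of_take schedule k hk3le (by rw [← hn]; exact hkn) hk3]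
    rw [if_neg (by omega : ¬ ((n:Int) - (sub:Int) ≤ 0))]
    rw [PySem.List.slice_toNat schedule (by omega) (by omega)]
    have ht1 : ((n:Int) - (sub:Int)).toNat = k := by omega
    have ht2 : ((n:Int) - (sub:Int) - 3).toNat = k - 3 := by omega
    rw [ht1, ht2]
    have htake : k - (k - 3) = 3 := by omega
    rw [htake, pvTake3_drop schedule (k-3) (by rw [← hn]; omega)]
    have hi2 : k - 3 + 1 = k - 2 := by omega
    have hi1 : k - 3 + 2 = k - 1 := by omega
    rw [hi2, hi1]
    show pvFoundLoop _ = _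
    rw [pvFoundLoop_eq_any]
    simp [List.any_append]
  · -- guard fails on both sides
    rw [if_neg hg]
    rw [if_pos (by omega : (n:Int) - (sub:Int) ≤ 0)]
    rfl
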